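-- pv_equiv track=rewrite | github.com/aws/aws-cli | tests/unit/botocore/test_endpoint.py | get_emitter_responses
-- ===== SOURCE A (Python) =====
-- def get_emitter_responses(num_retries=0, sleep_time=0):
--     emitter_responses = []
--     response_request_emitter_responses = [
--         [(None, None)],  # emit() response for request-created
--         [(None, None)],  # emit() response for before-send
--         [(None, None)],  # emit() response for response-received
--     ]
--     for _ in range(num_retries):
--         emitter_responses.extend(response_request_emitter_responses)
--         # emit() response for retry for sleep time
--         emitter_responses.append([(None, sleep_time)])
--     emitter_responses.extend(response_request_emitter_responses)
--     # emit() response for no retry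
--     emitter_responses.append([(None, None)])
--     return emitter_responses
-- ===== SOURCE B (Python) =====
-- def get_emitter_responses(num_retries=0, sleep_time=0):
--     n = max(num_retries, 0)
--     # Allocate the whole response list as (None, None) entries, then overwrite
--     # the sleep slot of each retry round: position i holds the retry-sleep
--     # response exactly when i % 4 == 3 and i < 4 * n.
--     # (Return value only: inner [(None, None)] lists are shared, not fresh.)
--     responses = [[(None, None)]] * (4 * n + 4)
--     for j in range(3, 4 * n, 4):
--         responses[j] = [(None, sleep_time)]
--     return responses
-- ===== Notes on version B (the rewrite author's own statement) =====
-- stated objective: alternative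
-- what changed: Instead of accumulating per-retry blocks with extend/append, B allocates the whole (4*n+4)-slot list of (None, None) responses at once and then overwrites the sleep slot of each retry round by striding over indices 3, 7, ..., 4*n-1; return-value equivalence only (B shares the (None, None) inner lists rather than making fresh ones).
import Mathlib
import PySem

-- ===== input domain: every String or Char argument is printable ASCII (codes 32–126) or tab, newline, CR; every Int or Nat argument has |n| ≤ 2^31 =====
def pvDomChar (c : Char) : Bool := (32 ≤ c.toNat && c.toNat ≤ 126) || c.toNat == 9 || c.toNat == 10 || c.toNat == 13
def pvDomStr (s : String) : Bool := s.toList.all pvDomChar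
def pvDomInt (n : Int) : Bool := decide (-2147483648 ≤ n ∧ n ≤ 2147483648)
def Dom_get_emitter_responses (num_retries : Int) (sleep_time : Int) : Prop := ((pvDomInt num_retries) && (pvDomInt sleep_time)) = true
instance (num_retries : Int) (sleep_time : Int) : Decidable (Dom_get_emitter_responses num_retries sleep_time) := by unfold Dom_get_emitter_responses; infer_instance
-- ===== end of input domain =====

-- B allocates the whole list of (None, None) responses at once and then overwrites the sleep
-- slot of each retry round by striding over indices 3, 7, …, instead of accumulating per-retry
-- blocks (objective: alternative; return value only — B shares the (None, None) inner lists).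

-- ===== PORT A =====
def get_emitter_responses (num_retries : Int) (sleep_time : Int) : List (List (Option Int × Option Int)) :=
  let response_request_emitter_responses : List (List (Option Int × Option Int)) :=
    [[(none, none)], [(none, none)], [(none, none)]]
  let emitter_responses :=
    (PySem.List.pyRange 0 num_retries 1).foldl
      (fun acc _ => acc ++ response_request_emitter_responses ++ [[(none, some sleep_time)]]) []
  emitter_responses ++ response_request_emitter_responses ++ [[(none, none)]]

-- ===== PORT B =====
def get_emitter_responses_alt (num_retries : Int) (sleep_time : Int) : List (List (Option Int × Option Int)) :=
  let n := max num_retries 0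
  -- Python '[[(None, None)]] * (4 * n + 4)' (count ≥ 0 here, so .toNat is exact)
  let responses : List (List (Option Int × Option Int)) :=
    List.replicate (4 * n + 4).toNat ([(none, none)] : List (Option Int × Option Int))
  -- 'for j in range(3, 4 * n, 4): responses[j] = [(None, sleep_time)]'
  (PySem.List.pyRange 3 (4 * n) 4).foldl
    (fun r j => PySem.List.pySetD r j [(none, some sleep_time)]) responses

-- ===== PRECONDITION & SPEC =====
def Spec_get_emitter_responses (num_retries : Int) (sleep_time : Int) (out : List (List (Option Int × Option Int))) : Prop := out = get_emitter_responses_alt num_retries sleep_time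
instance (num_retries : Int) (sleep_time : Int) (out : List (List (Option Int × Option Int))) : Decidable (Spec_get_emitter_responses num_retries sleep_time out) := by unfold Spec_get_emitter_responses; infer_instance

-- ===== CLAIM (what is proved, stated in full; the proofs are below) =====
def Claim_equal_get_emitter_responses : Prop := ∀ (num_retries : Int) (sleep_time : Int), Dom_get_emitter_responses num_retries sleep_time → Spec_get_emitter_responses num_retries sleep_time (get_emitter_responses num_retries sleep_time)

-- ===== LEMMAS AND PROOFS =====

-- A's loop appends a constant block each iteration.
theorem foldl_append_const_eq_replicate {α β : Type} (blk : List β) :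
    ∀ (l : List α) (acc : List β),
      l.foldl (fun a _ => a ++ blk) acc = acc ++ (List.replicate l.length blk).flatten := by
  intro l
  induction l with
  | nil => intro acc; simp
  | cons x xs ih =>
      intro acc
      rw [List.foldl_cons, ih, List.length_cons, List.replicate_succ, List.flatten_cons,
        List.append_assoc]

-- B's stride range(3, 4k, 4) is the indices 3, 7, …, 4k-1.
theorem pyRange_stride (k : Nat) :
    PySem.List.pyRange 3 (4 * (k : Int)) 4
      = (List.range k).map (fun t : Nat => (3 : Int) + 4 * (t : Int)) := by
  rw [PySem.List.pyRange_of_pos _ _ (by norm_num)]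
  rcases Nat.eq_zero_or_pos k with h | h
  · subst h; simp
  · have h3 : (3 : Int) < 4 * (k : Int) := by
      have : (1 : Int) ≤ (k : Int) := by exact_mod_cast h
      omega
    rw [if_pos h3]
    have hc : ((4 * (k : Int) - 3 + 4 - 1) / 4).toNat = k := by omega
    rw [hc]

-- Setting S at positions 3, 7, …, 4k-1 of an all-NN list of length 4k+m yields
-- k copies of [NN, NN, NN, S] followed by m copies of NN.
theorem set_blocks {α : Type} (S NN : α) : ∀ (k m : Nat),
    (((List.range k).map (fun t : Nat => (3 : Int) + 4 * (t : Int))).foldl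
        (fun r j => PySem.List.pySetD r j S) (List.replicate (4 * k + m) NN))
      = (List.replicate k [NN, NN, NN, S]).flatten ++ List.replicate m NN := by
  intro k
  induction k with
  | zero => intro m; simp
  | succ k ih =>
      intro m
      rw [List.range_succ, List.map_append, List.foldl_append]
      have hlen : 4 * (k + 1) + m = 4 * k + (m + 4) := by omega
      rw [hlen, ih (m + 4)]
      simp only [List.map_cons, List.map_nil, List.foldl_cons, List.foldl_nil]
      rw [PySem.List.pySetD_of_nonneg _ _ (by positivity)]
      have ht : ((3 : Int) + 4 * (k : Int)).toNat = 4 * k + 3 := by omega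
      have hflen : ((List.replicate k [NN, NN, NN, S]).flatten).length = 4 * k := by
        simp [List.length_flatten, mul_comm]
      rw [ht, List.set_append, hflen, if_neg (by omega)]
      have hm4 : m + 4 = 4 + m := by omega
      have hrep : List.replicate (m + 4) NN = NN :: NN :: NN :: NN :: List.replicate m NN := by
        rw [hm4, List.replicate_add]; rfl
      rw [hrep]
      have hidx : 4 * k + 3 - 4 * k = 3 := by omega
      rw [hidx]
      rw [List.replicate_succ', List.flatten_append]
      simp [List.set]

-- ===== VERDICT (by name: the statement is the Claim_ definition above) =====
theorem get_emitter_responses_spec : Claim_equal_get_emitter_responses := by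
  intro n s _
  unfold Spec_get_emitter_responses get_emitter_responses get_emitter_responses_alt
  simp only [List.append_assoc]
  rw [foldl_append_const_eq_replicate ([[(none, none)], [(none, none)], [(none, none)]] ++ [[(none, some s)]])]
  rw [PySem.List.length_pyRange_one]
  have hmax : max n 0 = ((n.toNat : Nat) : Int) := by omega
  rw [hmax, pyRange_stride n.toNat]
  have hcount : ((4 * ((n.toNat : Nat) : Int) + 4)).toNat = 4 * n.toNat + 4 := by omega
  rw [hcount, set_blocks [(none, some s)] [(none, none)] n.toNat 4]
  simp [List.replicate]
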